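-- pv_equiv track=rewrite | github.com/fluffystuks/encoder-decoder-by-25cst3 | handlers/encoder.py | shift_encrypt_ASCII
-- ===== SOURCE A (Python) =====
-- def shift_encrypt_ASCII(text, shift):
--     result = ""
--     for char in text:
--         code = ord(char)
--         if 32 <= code <= 126:
--             if code + shift > 126:
--                 new_code = 32 + ((code + shift) - 127)
--             elif code + shift < 32:
--                 new_code = 127 - (32 - (code + shift))
--             else:
--                 new_code = code + shift
--             result += chr(new_code)
--         else:
--             result += char
--     return result
-- ===== SOURCE B (Python) =====
-- def shift_encrypt_ASCII(text, shift):
--     # Build the 95-entry translation table once, then apply it in one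
--     # library-driven pass with str.translate (idiomatic; same wraparound rule).
--     table = {}
--     for code in range(32, 127):
--         new_code = code + shift
--         if new_code > 126:
--             new_code -= 95
--         elif new_code < 32:
--             new_code += 95
--         table[code] = new_code
--     return text.translate(table)
-- ===== Notes on version B (the rewrite author's own statement) =====
-- stated objective: idiomatic
-- what changed: B precomputes a 95-entry codepoint translation table once (same single-step non-modular wraparound rule) and applies it with str.translate in one C-level pass, instead of A's per-character Python-level branch-and-concatenate loop.
-- outside the precondition, e.g. on shift_encrypt_ASCII(' ', -2000): A raises ValueError, B raises ValueError
import Mathlib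
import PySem

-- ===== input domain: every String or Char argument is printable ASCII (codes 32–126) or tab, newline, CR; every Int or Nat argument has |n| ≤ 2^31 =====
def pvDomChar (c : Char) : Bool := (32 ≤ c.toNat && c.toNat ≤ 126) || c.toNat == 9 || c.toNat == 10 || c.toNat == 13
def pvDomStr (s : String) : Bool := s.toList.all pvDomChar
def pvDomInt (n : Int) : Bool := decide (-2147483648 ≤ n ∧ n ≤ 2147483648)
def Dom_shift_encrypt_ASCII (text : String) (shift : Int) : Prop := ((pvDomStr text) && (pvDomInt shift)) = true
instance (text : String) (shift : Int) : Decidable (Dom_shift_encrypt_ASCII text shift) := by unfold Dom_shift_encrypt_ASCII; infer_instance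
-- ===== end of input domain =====

-- B builds the 95-entry translation table once and applies it with str.translate; proof is about the return value only.

-- ===== PORT A =====
def shift_encrypt_ASCII (text : String) (shift : Int) : String :=
  String.mk (text.toList.foldl (fun (result : List Char) (char : Char) =>
    let code : Int := (char.toNat : Int)
    if 32 ≤ code ∧ code ≤ 126 then
      let new_code : Int :=
        if code + shift > 126 then 32 + ((code + shift) - 127)
        else if code + shift < 32 then 127 - (32 - (code + shift))
        else code + shift
      -- chr(new_code): exact inside Pre_, where new_code is a valid non-surrogate scalar
      result ++ [Char.ofNat new_code.toNat]
    else result ++ [char]) [])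

-- ===== PORT B =====
def shift_encrypt_ASCII_alt (text : String) (shift : Int) : String :=
  let table : PySem.Dict Int Int :=
    (PySem.List.pyRange 32 127 1).foldl (fun d code =>
      let nc0 := code + shift
      let new_code := if nc0 > 126 then nc0 - 95 else if nc0 < 32 then nc0 + 95 else nc0
      d.insert code new_code) PySem.Dict.empty
  -- text.translate(table): each char is replaced by its mapped codepoint, unmapped chars kept
  String.mk (text.toList.map (fun ch =>
    match table.get? ((ch.toNat : Int)) with
    | some nc => Char.ofNat nc.toNat   -- exact inside Pre_ (valid non-surrogate scalar)
    | none => ch))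

-- ===== PRECONDITION & SPEC =====
-- Pre_ excludes inputs where A raises ValueError (chr of a code outside range(0x110000); B's translate
-- raises there too) and inputs whose returned string would contain a surrogate codepoint, which a Lean
-- String cannot represent (A and B return the same surrogate string there — see the cite in claim.json).
def Pre_shift_encrypt_ASCII (text : String) (shift : Int) : Prop :=
  (text.toList.all fun c =>
    decide (32 ≤ (c.toNat : Int) ∧ (c.toNat : Int) ≤ 126) →
      (decide (-95 ≤ (c.toNat : Int) + shift) && decide ((c.toNat : Int) + shift ≤ 1114206) &&
        !(decide (55391 ≤ (c.toNat : Int) + shift) && decide ((c.toNat : Int) + shift ≤ 57438)))) = true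
instance (text : String) (shift : Int) : Decidable (Pre_shift_encrypt_ASCII text shift) := by
  unfold Pre_shift_encrypt_ASCII; infer_instance

def pvWitness_shift_encrypt_ASCII : String × Int := ("Hi", 5)

def Spec_shift_encrypt_ASCII (text : String) (shift : Int) (out : String) : Prop := out = shift_encrypt_ASCII_alt text shift
instance (text : String) (shift : Int) (out : String) : Decidable (Spec_shift_encrypt_ASCII text shift out) := by unfold Spec_shift_encrypt_ASCII; infer_instance

-- ===== CLAIM (what is proved, stated in full; the proofs are below) =====
def Claim_equal_shift_encrypt_ASCII : Prop := ∀ (text : String) (shift : Int), Dom_shift_encrypt_ASCII text shift → Pre_shift_encrypt_ASCII text shift → Spec_shift_encrypt_ASCII text shift (shift_encrypt_ASCII text shift)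

-- ===== LEMMAS AND PROOFS =====

-- looking up a key in a dict built by inserting f c for each c in a key list
theorem get_foldl_insert (l : List Int) (f : Int → Int) (d : PySem.Dict Int Int) (k : Int) :
    (l.foldl (fun d c => d.insert c (f c)) d).get? k
      = if k ∈ l then some (f k) else d.get? k := by
  induction l generalizing d with
  | nil => simp
  | cons c rest ih =>
      simp only [List.foldl_cons, ih, PySem.Dict.get?_insert, List.mem_cons]
      by_cases hr : k ∈ rest <;> by_cases hc : k = c <;> simp [hr, hc]

-- A's accumulator loop is a map
theorem A_foldl_map (g : Char → Char) (l : List Char) (acc : List Char) :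
    l.foldl (fun r c => if 32 ≤ (c.toNat : Int) ∧ (c.toNat : Int) ≤ 126
        then r ++ [g c] else r ++ [c]) acc
      = acc ++ l.map (fun c => if 32 ≤ (c.toNat : Int) ∧ (c.toNat : Int) ≤ 126 then g c else c) := by
  induction l generalizing acc with
  | nil => simp
  | cons c rest ih =>
      rw [List.foldl_cons, ih]
      by_cases h : 32 ≤ (c.toNat : Int) ∧ (c.toNat : Int) ≤ 126
      · rw [if_pos h, List.map_cons, if_pos h]; simp
      · rw [if_neg h, List.map_cons, if_neg h]; simp

-- ===== VERDICT (by name: the statement is the Claim_ definition above) =====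
theorem shift_encrypt_ASCII_spec : Claim_equal_shift_encrypt_ASCII := by
  intro text shift _hdom _hpre
  unfold Spec_shift_encrypt_ASCII shift_encrypt_ASCII shift_encrypt_ASCII_alt
  simp only []
  rw [A_foldl_map]
  simp only [List.nil_append]
  apply congrArg String.mk
  apply List.map_congr_left
  intro c _hc
  rw [get_foldl_insert]
  simp only [PySem.List.mem_pyRange_one]
  by_cases h : 32 ≤ (c.toNat : Int) ∧ (c.toNat : Int) ≤ 126
  · have hmem : 32 ≤ (c.toNat : Int) ∧ (c.toNat : Int) < 127 := ⟨h.1, by omega⟩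
    rw [if_pos h, if_pos hmem]
    congr 2
    split_ifs <;> omega
  · have hmem : ¬ (32 ≤ (c.toNat : Int) ∧ (c.toNat : Int) < 127) := by omega
    rw [if_neg h, if_neg hmem, PySem.Dict.get?_empty]
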